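-- pv_equiv track=rewrite | github.com/GundalaNikhil/DSA | dsa-problems/Strings/solutions/python/STR-015-cyclic-shift-equality-classes.py | cyclic_shift_equivalence_classes
-- ===== SOURCE A (Python) =====
-- def cyclic_shift_equivalence_classes(strings: list[str]) -> int:
--     def minimal_rotation(s):
--         """Booth's algorithm for minimal rotation"""
--         s_doubled = s + s
--         n = len(s)
--         failure = [-1] * (2 * n)
--         k = 0
--
--         for j in range(1, 2 * n):
--             i = failure[j - k - 1]
--             while i != -1 and s_doubled[j] != s_doubled[k + i + 1]:
--                 if s_doubled[j] < s_doubled[k + i + 1]: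
--                     k = j - i - 1
--                 i = failure[i]
--
--             if s_doubled[j] != s_doubled[k + i + 1]:
--                 if s_doubled[j] < s_doubled[k + i + 1]:
--                     k = j
--                 failure[j - k] = -1
--             else:
--                 failure[j - k] = i + 1
--
--         return s[k:] + s[:k]
--
--     canonical_set = set()
--     for s in strings:
--         canonical = minimal_rotation(s)
--         canonical_set.add(canonical)
--
--     return len(canonical_set)
-- ===== SOURCE B (Python) =====
-- def cyclic_shift_equivalence_classes(strings: list[str]) -> int:
--     canon = {min(s[i:] + s[:i] for i in range(len(s))) if s else '' for s in strings}
--     return len(canon)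
-- ===== Notes on version B (the rewrite author's own statement) =====
-- stated objective: simpler
-- what changed: Replaces Booth's O(n) minimal-rotation machinery (doubled string, failure array, candidate rebasing) with the direct definition: the canonical form of each string is the lexicographic minimum over all n rotations, collected into a set comprehension.
import Mathlib
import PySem

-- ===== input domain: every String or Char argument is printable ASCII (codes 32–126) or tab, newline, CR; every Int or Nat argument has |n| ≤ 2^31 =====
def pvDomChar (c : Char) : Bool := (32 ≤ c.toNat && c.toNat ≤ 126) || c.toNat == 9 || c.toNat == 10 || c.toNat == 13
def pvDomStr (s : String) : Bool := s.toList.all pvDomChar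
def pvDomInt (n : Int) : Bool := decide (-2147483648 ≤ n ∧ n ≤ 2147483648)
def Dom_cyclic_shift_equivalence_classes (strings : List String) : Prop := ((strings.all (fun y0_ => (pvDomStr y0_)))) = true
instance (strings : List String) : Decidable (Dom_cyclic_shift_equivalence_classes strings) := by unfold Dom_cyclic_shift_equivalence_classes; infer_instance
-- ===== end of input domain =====

-- B replaces Booth's O(n) minimal-rotation machinery with the direct definition (lexicographic
-- minimum over all rotations, quadratic per string); same return value, objective: simpler.

-- ===== PORT A =====
-- s_doubled[t] (character read).  On every state either port reaches the index is in range
-- (Python never raises here), so the `getD` default is never taken.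
def pvGetC (sd : List Char) (t : Int) : Char := (PySem.List.pyGet? sd t).getD 'a'

-- failure[t] (list read); always in range on reachable states.
def pvGetF (f : List Int) (t : Int) : Int := (PySem.List.pyGet? f t).getD (-1)

-- failure[t] = v (list write, Python index semantics: negative t counts from the end);
-- always in range on reachable states.
def pvSetF (f : List Int) (t : Int) (v : Int) : List Int :=
  let u : Int := if t < 0 then t + f.length else t
  if 0 ≤ u ∧ u < (f.length : Int) then f.set u.toNat v else f

-- the inner `while i != -1 and s_doubled[j] != s_doubled[k+i+1]` loop; `fuel` only makes the
-- recursion structural (the failure chain strictly decreases, so fuel is never exhausted).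
def boothWhile (sd : List Char) (failure : List Int) (j : Int) :
    Nat → Int → Int → Int × Int
  | 0, i, k => (i, k)
  | fuel + 1, i, k =>
    if i ≠ -1 ∧ pvGetC sd j ≠ pvGetC sd (k + i + 1) then
      let k' := if pvGetC sd j < pvGetC sd (k + i + 1) then j - i - 1 else k
      boothWhile sd failure j fuel (pvGetF failure i) k'
    else (i, k)

-- one iteration of `for j in range(1, 2*n)` carrying the state (k, failure)
def boothStep (sd : List Char) (st : Int × List Int) (j : Int) : Int × List Int :=
  let k := st.1
  let failure := st.2
  let i0 := pvGetF failure (j - k - 1)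
  let p := boothWhile sd failure j (i0 + 2).toNat i0 k
  let i := p.1
  let k1 := p.2
  if pvGetC sd j ≠ pvGetC sd (k1 + i + 1) then
    let k2 := if pvGetC sd j < pvGetC sd (k1 + i + 1) then j else k1
    (k2, pvSetF failure (j - k2) (-1))
  else
    (k1, pvSetF failure (j - k1) (i + 1))

def pvMinimalRotation (s : String) : String :=
  let sl := s.toList
  let sd := sl ++ sl
  let n := sl.length
  let st := (PySem.List.pyRange 1 (2 * (n : Int)) 1).foldl (boothStep sd) (0, List.replicate (2 * n) (-1))
  let k := st.1
  String.ofList (PySem.List.slice sl (some k) none ++ PySem.List.slice sl none (some k))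

def cyclic_shift_equivalence_classes (strings : List String) : Int :=
  let canonical_set : PySem.Set String :=
    strings.foldl (fun acc s => PySem.Set.add acc (pvMinimalRotation s)) PySem.Set.empty
  PySem.Set.len canonical_set

-- ===== PORT B =====
-- min(s[i:] + s[:i] for i in range(len(s))) if s else ''
def pvBruteCanon (s : String) : String :=
  let sl := s.toList
  if sl.length = 0 then "" else
    ((PySem.List.min?
        ((PySem.List.pyRange 0 (sl.length : Int) 1).map (fun i =>
          String.ofList (PySem.List.slice sl (some i) none ++ PySem.List.slice sl none (some i))))
        (fun x => x)).getD "")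

def cyclic_shift_equivalence_classes_alt (strings : List String) : Int :=
  PySem.Set.len (PySem.Set.ofList (strings.map pvBruteCanon))

-- ===== PRECONDITION & SPEC =====
def Spec_cyclic_shift_equivalence_classes (strings : List String) (out : Int) : Prop := out = cyclic_shift_equivalence_classes_alt strings
instance (strings : List String) (out : Int) : Decidable (Spec_cyclic_shift_equivalence_classes strings out) := by unfold Spec_cyclic_shift_equivalence_classes; infer_instance

-- ===== CLAIM (what is proved, stated in full; the proofs are below) =====
def Claim_equal_cyclic_shift_equivalence_classes : Prop := ∀ (strings : List String), Dom_cyclic_shift_equivalence_classes strings → Spec_cyclic_shift_equivalence_classes strings (cyclic_shift_equivalence_classes strings)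

-- ===== LEMMAS AND PROOFS =====

-- first-difference comparison of the length-m windows of x starting at a and b
def pvCEq (x : Nat → Char) (a b m : Nat) : Prop := ∀ t, t < m → x (a + t) = x (b + t)
def pvCLt (x : Nat → Char) (a b m : Nat) : Prop :=
  ∃ t, t < m ∧ (∀ u, u < t → x (a + u) = x (b + u)) ∧ x (a + t) < x (b + t)
def pvCLe (x : Nat → Char) (a b m : Nat) : Prop := pvCLt x a b m ∨ pvCEq x a b m

theorem pvCEq_refl (x a m) : pvCEq x a a m := fun _ _ => rfl
theorem pvCEq_symm {x a b m} (h : pvCEq x a b m) : pvCEq x b a m := fun t ht => (h t ht).symm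
theorem pvCEq_mono {x a b m m'} (hm : m' ≤ m) (h : pvCEq x a b m) : pvCEq x a b m' :=
  fun t ht => h t (lt_of_lt_of_le ht hm)
theorem pvCLt_mono {x a b m m'} (hm : m ≤ m') (h : pvCLt x a b m) : pvCLt x a b m' := by
  obtain ⟨t, ht, hpre, hlt⟩ := h; exact ⟨t, lt_of_lt_of_le ht hm, hpre, hlt⟩
theorem pvCLe_restrict {x a b m m'} (hm : m' ≤ m) (h : pvCLe x a b m) : pvCLe x a b m' := by
  rcases h with ⟨t, ht, hpre, hlt⟩ | he
  · by_cases h' : t < m'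
    · exact Or.inl ⟨t, h', hpre, hlt⟩
    · exact Or.inr (fun u hu => hpre u (lt_of_lt_of_le hu (le_of_not_gt h')))
  · exact Or.inr (pvCEq_mono hm he)
theorem pvCLt_asymm {x a b m} (h : pvCLt x a b m) (h' : pvCLt x b a m) : False := by
  obtain ⟨t, ht, hpre, hlt⟩ := h; obtain ⟨t', ht', hpre', hlt'⟩ := h'
  rcases lt_trichotomy t t' with hc | hc | hc
  · exact absurd (hpre' t hc).symm (ne_of_lt hlt)
  · subst hc; exact absurd hlt' (not_lt_of_gt hlt)
  · exact absurd (hpre t' hc).symm (ne_of_lt hlt')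
theorem pvCLt_not_ceq {x a b m} (h : pvCLt x a b m) : ¬ pvCEq x a b m := by
  obtain ⟨t, ht, _, hlt⟩ := h; intro he; exact absurd (he t ht) (ne_of_lt hlt)

theorem pvCLt_trans_min {x a b c m₁ m₂} (h₁ : pvCLt x a b m₁) (h₂ : pvCLt x b c m₂) :
    pvCLt x a c (min m₁ m₂) := by
  obtain ⟨t₁, ht₁, hp₁, hl₁⟩ := h₁; obtain ⟨t₂, ht₂, hp₂, hl₂⟩ := h₂
  rcases lt_trichotomy t₁ t₂ with hc | hc | hc
  · exact ⟨t₁, by omega, fun u hu => (hp₁ u hu).trans (hp₂ u (by omega)), by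
      rw [hp₂ t₁ hc] at hl₁; exact hl₁⟩
  · subst hc; exact ⟨t₁, by omega, fun u hu => (hp₁ u hu).trans (hp₂ u hu), lt_trans hl₁ hl₂⟩
  · exact ⟨t₂, by omega, fun u hu => (hp₁ u (by omega)).trans (hp₂ u hu), by
      rw [hp₁ t₂ hc]; exact hl₂⟩



-- borders: b is a proper border length of the window [a, a+L)
def pvIsB (x : Nat → Char) (a L b : Nat) : Prop := b < L ∧ pvCEq x a (a + (L - b)) b
def pvIsBb (x : Nat → Char) (a L b : Nat) : Bool :=
  decide (b < L) && (List.range b).all (fun t => x (a + t) == x (a + (L - b) + t))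
theorem pvIsBb_iff {x a L b} : pvIsBb x a L b = true ↔ pvIsB x a L b := by
  unfold pvIsBb pvIsB pvCEq
  simp [List.all_eq_true, List.mem_range]
def pvMaxB (x : Nat → Char) (a L : Nat) : Nat :=
  Nat.findGreatest (fun b => pvIsBb x a L b = true) (L - 1)
theorem pvIsB_zero {x a L} (h : 0 < L) : pvIsB x a L 0 :=
  ⟨h, fun t ht => absurd ht (Nat.not_lt_zero t)⟩
theorem pvMaxB_isB {x a L} (h : 0 < L) : pvIsB x a L (pvMaxB x a L) := by
  have h0 : pvIsBb x a L 0 = true := pvIsBb_iff.mpr (pvIsB_zero h)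
  have := Nat.findGreatest_spec (P := fun b => pvIsBb x a L b = true) (Nat.zero_le (L - 1)) h0
  exact pvIsBb_iff.mp this
theorem pvLe_maxB {x a L b} (h : pvIsB x a L b) : b ≤ pvMaxB x a L := by
  have hb : b < L := h.1
  exact Nat.le_findGreatest (by omega) (pvIsBb_iff.mpr h)
theorem pvMaxB_lt {x a L} (h : 0 < L) : pvMaxB x a L < L :=
  lt_of_le_of_lt (Nat.findGreatest_le _) (by omega)
theorem pvIsB_nested {x a L b₁ b₂} (h₂ : pvIsB x a L b₂) (h₁ : pvIsB x a L b₁) (hlt : b₁ < b₂) :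
    pvIsB x a b₂ b₁ := by
  obtain ⟨hb₂, he₂⟩ := h₂; obtain ⟨hb₁, he₁⟩ := h₁
  refine ⟨hlt, fun t ht => ?_⟩
  have e1 := he₁ t ht
  have e2 := he₂ (b₂ - b₁ + t) (by omega)
  have i1 : a + (L - b₂) + (b₂ - b₁ + t) = a + (L - b₁) + t := by omega
  have i2 : a + (b₂ - b₁) + t = a + (b₂ - b₁ + t) := by omega
  rw [i2, e2, i1, ← e1]
theorem pvIsB_trans {x a L b₁ b₂} (h₂ : pvIsB x a L b₂) (h₁ : pvIsB x a b₂ b₁) : pvIsB x a L b₁ := by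
  obtain ⟨hb₂, he₂⟩ := h₂; obtain ⟨hb₁, he₁⟩ := h₁
  refine ⟨lt_trans hb₁ hb₂, fun t ht => ?_⟩
  have e1 := he₁ t ht
  have e2 := he₂ (b₂ - b₁ + t) (by omega)
  have i1 : a + (b₂ - b₁) + t = a + (b₂ - b₁ + t) := by omega
  have i2 : a + (L - b₂) + (b₂ - b₁ + t) = a + (L - b₁) + t := by omega
  rw [e1, i1, e2, i2]
theorem pvIsB_congr {x a a' L b} (he : pvCEq x a a' L) (h : pvIsB x a L b) : pvIsB x a' L b := by
  obtain ⟨hb, hee⟩ := h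
  refine ⟨hb, fun t ht => ?_⟩
  have h2 := hee t ht
  have h3 := he ((L - b) + t) (by omega)
  have i1 : a + (L - b) + t = a + ((L - b) + t) := by omega
  have i2 : a' + (L - b) + t = a' + ((L - b) + t) := by omega
  rw [i2, ← h3, ← i1, ← h2]
  exact (he t (by omega)).symm
theorem pvMaxB_congr {x a a' L} (he : pvCEq x a a' L) : pvMaxB x a L = pvMaxB x a' L := by
  rcases Nat.eq_zero_or_pos L with h0 | hL
  · subst h0; rfl
  · exact le_antisymm (pvLe_maxB (pvIsB_congr he (pvMaxB_isB hL)))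
      (pvLe_maxB (pvIsB_congr (pvCEq_symm he) (pvMaxB_isB hL)))

-- ===== model of Booth's loop over Nat (failure values stored as border LENGTHS: F q = failure[q] + 1) =====
def pvUpd (F : Nat → Nat) (q v : Nat) : Nat → Nat := fun r => if r = q then v else F r

def pvMWhile (x : Nat → Char) (F : Nat → Nat) (j : Nat) : Nat → Nat → Nat × Nat
  | 0, k => (0, k)
  | m + 1, k =>
    if x j = x (k + (m + 1)) then (m + 1, k)
    else
      let k' := if x j < x (k + (m + 1)) then j - (m + 1) else k
      if h : F m < m + 1 then pvMWhile x F j (F m) k' else (0, k')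
  termination_by m _ => m
  decreasing_by omega

def pvMStep (x : Nat → Char) (j : Nat) (st : Nat × (Nat → Nat)) : Nat × (Nat → Nat) :=
  let p := pvMWhile x st.2 j (st.2 (j - st.1 - 1)) st.1
  if x j = x (p.2 + p.1) then (p.2, pvUpd st.2 (j - p.2) (p.1 + 1))
  else if x j < x (p.2 + p.1) then (j, pvUpd st.2 0 0)
  else (p.2, pvUpd st.2 (j - p.2) 0)

def pvMRun (x : Nat → Char) : Nat → Nat × (Nat → Nat)
  | 0 => (0, fun _ => 0)
  | d + 1 => pvMStep x (d + 1) (pvMRun x d)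

-- the global invariant after the window [·, j) has been processed, leader k, failure F
def pvInv (x : Nat → Char) (j k : Nat) (F : Nat → Nat) : Prop :=
  k < j ∧
  (∀ q, q < j - k → F q = pvMaxB x k (q + 1)) ∧
  (∀ p, p < k → pvCLt x k p (j - k)) ∧
  (∀ p, k < p → p < j → pvCLe x k p (j - p))

-- postcondition of the inner while loop (everything phrased from the window start kc)
def pvPost (x : Nat → Char) (kc L j : Nat) (r : Nat × Nat) : Prop :=
  pvIsB x kc L r.1 ∧
  (r.2 = kc ∨ (kc < r.2 ∧ r.2 < j ∧ pvCEq x r.2 kc (j - r.2) ∧ r.1 < j - r.2 ∧ x j < x (kc + (j - r.2)))) ∧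
  (∀ b, pvIsB x kc L b → r.1 < b → x j ≠ x (kc + b)) ∧
  (∀ b, pvIsB x kc L b → r.1 < b → j - b ≠ r.2 → pvCLt x r.2 (j - b) (min (j + 1 - r.2) (b + 1))) ∧
  (r.1 = 0 ∨ x j = x (kc + r.1)) ∧ (x (r.2 + r.1) = x (kc + r.1))


theorem pvMWhile_zero (x F j k) : pvMWhile x F j 0 k = (0, k) := by
  simp [pvMWhile]

theorem pvMWhile_succ_match (x F j k m) (h : x j = x (k + (m + 1))) :
    pvMWhile x F j (m + 1) k = (m + 1, k) := by
  rw [pvMWhile]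
  simp [h]

theorem pvMWhile_succ_mis (x F j k m) (h : ¬ x j = x (k + (m + 1))) (hF : F m < m + 1) :
    pvMWhile x F j (m + 1) k
      = pvMWhile x F j (F m) (if x j < x (k + (m + 1)) then j - (m + 1) else k) := by
  rw [pvMWhile]
  simp [h, hF]

theorem pvLoop (x : Nat → Char) (kc L j : Nat) (F : Nat → Nat) (hL : 0 < L) (hj : j = kc + L)
    (HF : ∀ q, q < L → F q = pvMaxB x kc (q + 1)) :
    ∀ m curK, pvIsB x kc L m →
    (curK = kc ∨ (kc < curK ∧ curK < j ∧ pvCEq x curK kc (j - curK) ∧ m < j - curK ∧ x j < x (kc + (j - curK)))) →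
    (∀ b, pvIsB x kc L b → m < b → x j ≠ x (kc + b)) →
    (∀ b, pvIsB x kc L b → m < b → j - b ≠ curK → pvCLt x curK (j - b) (min (j + 1 - curK) (b + 1))) →
    pvPost x kc L j (pvMWhile x F j m curK) := by
  intro m
  induction m using Nat.strong_induction_on with
  | _ m IH =>
  intro curK hmb hcur hbeat hdom
  have hbridge : ∀ t, t ≤ m → x (curK + t) = x (kc + t) := by
    intro t ht
    rcases hcur with h | ⟨_, _, hceq, hmlt, _⟩
    · rw [h]
    · exact hceq t (by omega)
  rcases m with _ | m
  · rw [pvMWhile_zero]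
    exact ⟨pvIsB_zero hL, hcur, hbeat, hdom, Or.inl rfl, hbridge 0 (le_refl 0)⟩
  · have hm1L : m + 1 < L := hmb.1
    have hcopy : ∀ t, t < m + 1 → x ((j - (m + 1)) + t) = x (kc + t) := by
      intro t ht
      have h2 := hmb.2 t ht
      have hi : kc + (L - (m + 1)) + t = (j - (m + 1)) + t := by omega
      rw [hi] at h2
      exact h2.symm
    by_cases hmatch : x j = x (curK + (m + 1))
    · rw [pvMWhile_succ_match x F j curK m hmatch]
      refine ⟨hmb, hcur, hbeat, hdom, Or.inr ?_, (hbridge (m + 1) le_rfl)⟩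
      rw [hmatch]; exact hbridge (m + 1) le_rfl
    · have hFm : F m = pvMaxB x kc (m + 1) := HF m (by omega)
      have hFmlt : F m < m + 1 := by rw [hFm]; exact pvMaxB_lt (by omega)
      rw [pvMWhile_succ_mis x F j curK m hmatch hFmlt]
      have hxner : x j ≠ x (kc + (m + 1)) := by rw [← hbridge (m + 1) le_rfl]; exact hmatch
      have hmb' : pvIsB x kc L (F m) := by
        rw [hFm]; exact pvIsB_trans hmb (pvMaxB_isB (by omega))
      have hsmall : ∀ b, pvIsB x kc L b → F m < b → b < m + 1 → False := by
        intro b hb hbg hblt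
        have : b ≤ pvMaxB x kc (m + 1) := pvLe_maxB (pvIsB_nested hmb hb hblt)
        omega
      have hbeat' : ∀ b, pvIsB x kc L b → F m < b → x j ≠ x (kc + b) := by
        intro b hb hbg
        rcases lt_trichotomy b (m + 1) with hc | hc | hc
        · exact absurd (hsmall b hb hbg hc) (fun h => h)
        · subst hc; exact hxner
        · exact hbeat b hb (by omega)
      by_cases hlt : x j < x (curK + (m + 1))
      · -- rebase: k' = j - (m + 1)
        rw [if_pos hlt]
        have hxlt : x j < x (kc + (m + 1)) := by rw [← hbridge (m + 1) le_rfl]; exact hlt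
        have hw : j - (j - (m + 1)) = m + 1 := by omega
        refine IH (F m) (by omega) (j - (m + 1)) hmb' (Or.inr ⟨by omega, by omega, ?_, ?_, ?_⟩) hbeat' ?_
        · rw [hw]; exact fun t ht => hcopy t ht
        · omega
        · rw [hw]; exact hxlt
        · intro b hb hbg hguard
          rcases lt_trichotomy b (m + 1) with hc | hc | hc
          · exact absurd (hsmall b hb hbg hc) (fun h => h)
          · exact absurd (by rw [hc]) hguard
          · have hbcopy : ∀ t, t < b → x ((j - b) + t) = x (kc + t) := by
              intro t ht
              have h2 := hb.2 t ht
              have hi : kc + (L - b) + t = (j - b) + t := by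
                have := hb.1; omega
              rw [hi] at h2
              exact h2.symm
            have hmin : min (j + 1 - (j - (m + 1))) (b + 1) = m + 2 := by omega
            rw [hmin]
            refine ⟨m + 1, by omega, ?_, ?_⟩
            · intro u hu
              rw [hcopy u hu, hbcopy u (by omega)]
            · have hij : (j - (m + 1)) + (m + 1) = j := by omega
              rw [hij, hbcopy (m + 1) (by omega)]
              exact hxlt
      · -- no rebase: k' = curK
        rw [if_neg hlt]
        have hxgt : x (kc + (m + 1)) < x j := by
          rw [← hbridge (m + 1) le_rfl]
          exact lt_of_le_of_ne (le_of_not_gt hlt) (fun h => hmatch h.symm)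
        refine IH (F m) (by omega) curK hmb' ?_ hbeat' ?_
        · rcases hcur with h | ⟨h1, h2, h3, h4, h5⟩
          · exact Or.inl h
          · exact Or.inr ⟨h1, h2, h3, by omega, h5⟩
        · intro b hb hbg hguard
          rcases lt_trichotomy b (m + 1) with hc | hc | hc
          · exact absurd (hsmall b hb hbg hc) (fun h => h)
          · subst hc
            have hbnd : m + 1 < j + 1 - curK := by
              rcases hcur with h | ⟨_, _, _, h4, _⟩
              · subst h; omega
              · omega
            refine ⟨m + 1, by omega, ?_, ?_⟩
            · intro u hu
              rw [hbridge u (by omega), hcopy u hu]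
            · have hij : (j - (m + 1)) + (m + 1) = j := by omega
              rw [hij, hbridge (m + 1) le_rfl]
              exact hxgt
          · exact hdom b hb (by omega) hguard


theorem pvCLt_head {x a b m} (h : pvCLt x a b m) : x a ≤ x b := by
  obtain ⟨t, ht, hpre, hlt⟩ := h
  rcases Nat.eq_zero_or_pos t with h0 | h0
  · subst h0; simpa using le_of_lt hlt
  · have := hpre 0 h0; simp at this; exact le_of_eq this
theorem pvCLe_head {x a b m} (h : pvCLe x a b m) (hm : 0 < m) : x a ≤ x b := by
  rcases h with h | h
  · exact pvCLt_head h
  · have := h 0 hm; simp at this; exact le_of_eq this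
theorem pvMaxB_one (x a) : pvMaxB x a 1 = 0 := rfl

-- every character of the processed window is ≥ the leader's first character
theorem pvInv_firstChar {x j k F} (h : pvInv x j k F) : ∀ p, p < j → x k ≤ x p := by
  obtain ⟨hkj, _, G2, G3⟩ := h
  intro p hp
  rcases lt_trichotomy p k with hc | hc | hc
  · exact pvCLt_head (G2 p hc)
  · subst hc; exact le_refl _
  · exact pvCLe_head (G3 p hc hp) (by omega)

-- a proper border b' ≥ 1 of the extended window [ke, j+1) comes from a border b'-1 of the
-- old window [kc, j) whose following character matches x j
theorem pvDecomp {x : Nat → Char} {kc L j ke : Nat} (hj : j = kc + L) (hkc : kc ≤ ke) (hkj : ke < j)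
    (hceq : pvCEq x ke kc (j - ke)) (b' : Nat) (hb' : pvIsB x ke (j - ke + 1) b') (h1 : 1 ≤ b') :
    pvIsB x kc L (b' - 1) ∧ x j = x (kc + (b' - 1)) := by
  obtain ⟨hblt, hbe⟩ := hb'
  have hble : b' ≤ j - ke := by omega
  have hmain : ∀ t, t < b' → x (kc + t) = x ((j + 1 - b') + t) := by
    intro t ht
    have h2 := hbe t ht
    have hi : ke + (j - ke + 1 - b') + t = (j + 1 - b') + t := by omega
    rw [hi] at h2
    rw [← hceq t (by omega)]
    exact h2
  constructor
  · refine ⟨by omega, fun t ht => ?_⟩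
    have h2 := hmain t (by omega)
    have hi : (j + 1 - b') + t = kc + (L - (b' - 1)) + t := by omega
    rw [hi] at h2
    exact h2
  · have h2 := hmain (b' - 1) (by omega)
    have hi : (j + 1 - b') + (b' - 1) = j := by omega
    rw [hi] at h2
    exact h2.symm

-- conversely a matching continuation extends a border of the old window
theorem pvExtendBorder {x : Nat → Char} {kc L j ke me : Nat} (hj : j = kc + L) (hkc : kc ≤ ke) (hkj : ke < j)
    (hceq : pvCEq x ke kc (j - ke)) (hme : pvIsB x kc L me) (hlt : me < j - ke)
    (hx : x j = x (kc + me)) : pvIsB x ke (j - ke + 1) (me + 1) := by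
  obtain ⟨hmeL, hmee⟩ := hme
  refine ⟨by omega, fun t ht => ?_⟩
  have hi : ke + (j - ke + 1 - (me + 1)) + t = (j - me) + t := by omega
  rw [hi]
  rcases Nat.lt_or_ge t me with hc | hc
  · have h2 := hmee t hc
    have hi2 : kc + (L - me) + t = (j - me) + t := by omega
    rw [hi2] at h2
    rw [hceq t (by omega), h2]
  · have ht' : t = me := by omega
    rw [ht']
    have hi2 : (j - me) + me = j := by omega
    rw [hi2, hceq me (by omega), ← hx]

-- among two borders, the continuation character of the shorter is ≤ that of the longer
theorem pvSmallTie {x : Nat → Char} {kc L j : Nat} (hj : j = kc + L)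
    (G3 : ∀ p, kc < p → p < j → pvCLe x kc p (j - p)) {b me : Nat}
    (hbb : pvIsB x kc L b) (hmeb : pvIsB x kc L me) (hlt : b < me) :
    x (kc + b) ≤ x (kc + me) := by
  by_contra hgt
  have hgt : x (kc + me) < x (kc + b) := lt_of_not_ge hgt
  have hnested : pvIsB x kc me b := pvIsB_nested hmeb hbb hlt
  have hq0 : pvCLt x (kc + (me - b)) kc (b + 1) := by
    refine ⟨b, by omega, fun u hu => ?_, ?_⟩
    · have := hnested.2 u hu
      have hi : kc + (me - b) + u = kc + (me - b) + u := rfl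
      exact (this).symm
    · have hi : kc + (me - b) + b = kc + me := by omega
      rw [hi]
      exact hgt
  have hmeL : me < L := hmeb.1
  have hcle := G3 (kc + (me - b)) (by omega) (by omega)
  have hwin : b + 1 ≤ j - (kc + (me - b)) := by omega
  have hcle' := pvCLe_restrict hwin hcle
  rcases hcle' with h | h
  · exact pvCLt_asymm h hq0
  · exact pvCLt_not_ceq hq0 (pvCEq_symm h)

theorem pvStep_inv (x : Nat → Char) (j k : Nat) (F : Nat → Nat) (h : pvInv x j k F) :
    pvInv x (j + 1) (pvMStep x j (k, F)).1 (pvMStep x j (k, F)).2 := by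
  have hInv := h
  obtain ⟨hkj, HF, G2, G3⟩ := h
  have hL : 0 < j - k := by omega
  have hj' : j = k + (j - k) := by omega
  have hm0 : F (j - k - 1) = pvMaxB x k (j - k) := by
    have h1 := HF (j - k - 1) (by omega)
    have hi : j - k - 1 + 1 = j - k := by omega
    rw [hi] at h1
    exact h1
  have hpost := pvLoop x k (j - k) j F hL hj' HF (F (j - k - 1)) k
      (by rw [hm0]; exact pvMaxB_isB hL)
      (Or.inl rfl)
      (by
        intro b hb hbg
        rw [hm0] at hbg
        exact absurd (pvLe_maxB hb) (by omega))
      (by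
        intro b hb hbg _
        rw [hm0] at hbg
        exact absurd (pvLe_maxB hb) (by omega))
  set r := pvMWhile x F j (F (j - k - 1)) k with hr
  obtain ⟨E1, E2, E3, E4, E5, E6⟩ := hpost
  have hmejk : r.1 < j - k := E1.1
  have hkle : k ≤ r.2 := by rcases E2 with h | ⟨h1, _⟩ <;> omega
  have hkej : r.2 < j := by rcases E2 with h | ⟨_, h2, _⟩ <;> omega
  have hceq : pvCEq x r.2 k (j - r.2) := by
    rcases E2 with h | ⟨_, _, h3, _⟩
    · rw [h]; exact pvCEq_refl x k (j - k)
    · exact h3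
  have hmec : r.1 < j - r.2 := by
    rcases E2 with h | ⟨_, _, _, h4, _⟩ <;> omega
  have HG1low : ∀ q, q < j - r.2 → F q = pvMaxB x r.2 (q + 1) := by
    intro q hq
    rw [HF q (by omega)]
    exact pvMaxB_congr (pvCEq_symm (pvCEq_mono (by omega) hceq))
  have HG2' : ∀ p, p < r.2 → pvCLt x r.2 p (j + 1 - r.2) := by
    rcases E2 with he | ⟨h1, h2, h3, h4, h5⟩
    · intro p hp
      rw [he] at hp ⊢
      exact pvCLt_mono (by omega) (G2 p hp)
    · have hlead : pvCLt x r.2 k (j + 1 - r.2) := by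
        refine ⟨j - r.2, by omega, fun u hu => h3 u hu, ?_⟩
        have hi : r.2 + (j - r.2) = j := by omega
        rw [hi]
        exact h5
      intro p hp
      rcases lt_trichotomy p k with hc | hc | hc
      · have h6 := pvCLt_trans_min hlead (G2 p hc)
        have hm : min (j + 1 - r.2) (j - k) = j + 1 - r.2 := by omega
        rw [hm] at h6
        exact h6
      · rw [← hc] at hlead
        exact hlead
      · rcases G3 p hc (by omega) with hstrict | htie
        · have h6 := pvCLt_trans_min hlead hstrict
          have hm : min (j + 1 - r.2) (j - p) = j + 1 - r.2 := by omega
          rw [hm] at h6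
          exact h6
        · have hbord : pvIsB x k (j - k) (j - p) := by
            refine ⟨by omega, fun t ht => ?_⟩
            have hi : k + (j - k - (j - p)) + t = p + t := by omega
            rw [hi]
            exact htie t ht
          have h6 := E4 (j - p) hbord (by omega) (by omega)
          have hi : j - (j - p) = p := by omega
          rw [hi] at h6
          have hm : min (j + 1 - r.2) (j - p + 1) = j + 1 - r.2 := by omega
          rw [hm] at h6
          exact h6
  have HG3mid : ∀ p, r.2 < p → p < j → pvCLe x r.2 p (j + 1 - p) := by
    intro p hp hpj
    rcases G3 p (by omega) hpj with hstrict | htie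
    · obtain ⟨t, ht, hpre, hlt⟩ := hstrict
      refine Or.inl ⟨t, by omega, fun u hu => ?_, ?_⟩
      · rw [hceq u (by omega)]
        exact hpre u hu
      · rw [hceq t (by omega)]
        exact hlt
    · have hbord : pvIsB x k (j - k) (j - p) := by
        refine ⟨by omega, fun t ht => ?_⟩
        have hi : k + (j - k - (j - p)) + t = p + t := by omega
        rw [hi]
        exact htie t ht
      have hpre : ∀ u, u < j - p → x (r.2 + u) = x (p + u) := by
        intro u hu
        rw [hceq u (by omega)]
        exact htie u hu
      rcases lt_trichotomy r.1 (j - p) with hc | hc | hc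
      · have h6 := E4 (j - p) hbord hc (by omega)
        have hi : j - (j - p) = p := by omega
        rw [hi] at h6
        have hm : min (j + 1 - r.2) (j - p + 1) = j - p + 1 := by omega
        rw [hm] at h6
        have hi2 : j + 1 - p = j - p + 1 := by omega
        rw [hi2]
        exact Or.inl h6
      · rcases E5 with h0 | hxm
        · omega
        · refine Or.inr (fun t ht => ?_)
          rcases Nat.lt_or_ge t (j - p) with htb | htb
          · exact hpre t htb
          · have ht' : t = j - p := by omega
            rw [ht']
            have hi : p + (j - p) = j := by omega
            rw [hi, hceq (j - p) (by omega), ← hc, ← hxm]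
      · rcases E5 with h0 | hxm
        · omega
        · have hsle := pvSmallTie hj' G3 hbord E1 hc
          have hlast : x (p + (j - p)) = x (k + r.1) := by
            have hi : p + (j - p) = j := by omega
            rw [hi]
            exact hxm
          rcases lt_or_eq_of_le hsle with hltc | heqc
          · refine Or.inl ⟨j - p, by omega, hpre, ?_⟩
            rw [hceq (j - p) (by omega), hlast]
            exact hltc
          · refine Or.inr (fun t ht => ?_)
            rcases Nat.lt_or_ge t (j - p) with htb | htb
            · exact hpre t htb
            · have ht' : t = j - p := by omega
              rw [ht', hceq (j - p) (by omega), hlast, heqc]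
  have hstep : pvMStep x j (k, F)
      = if x j = x (r.2 + r.1) then (r.2, pvUpd F (j - r.2) (r.1 + 1))
        else if x j < x (r.2 + r.1) then (j, pvUpd F 0 0)
        else (r.2, pvUpd F (j - r.2) 0) := rfl
  by_cases hmx : x j = x (r.2 + r.1)
  · rw [hstep, if_pos hmx]
    have hxme : x j = x (k + r.1) := hmx.trans E6
    refine ⟨by omega, ?_, HG2', ?_⟩
    · intro q hq
      by_cases hqc : q = j - r.2
      · subst hqc
        show pvUpd F (j - r.2) (r.1 + 1) (j - r.2) = pvMaxB x r.2 (j - r.2 + 1)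
        have hupd : pvUpd F (j - r.2) (r.1 + 1) (j - r.2) = r.1 + 1 := by simp [pvUpd]
        rw [hupd]
        have hub := pvExtendBorder hj' hkle hkej hceq E1 hmec hxme
        have hMgood := pvMaxB_isB (x := x) (a := r.2) (L := j - r.2 + 1) (by omega)
        have hMge : r.1 + 1 ≤ pvMaxB x r.2 (j - r.2 + 1) := pvLe_maxB hub
        have hdec := pvDecomp hj' hkle hkej hceq (pvMaxB x r.2 (j - r.2 + 1)) hMgood (by omega)
        have hnb : ¬ (r.1 + 1 < pvMaxB x r.2 (j - r.2 + 1)) := by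
          intro hlt
          exact E3 (pvMaxB x r.2 (j - r.2 + 1) - 1) hdec.1 (by omega) hdec.2
        omega
      · show pvUpd F (j - r.2) (r.1 + 1) q = pvMaxB x r.2 (q + 1)
        have hupd : pvUpd F (j - r.2) (r.1 + 1) q = F q := by simp [pvUpd, hqc]
        rw [hupd]
        exact HG1low q (by omega)
    · intro p hp hpj1
      by_cases hpj : p = j
      · refine (by rw [hpj]; exact id : pvCLe x r.2 j (j + 1 - j) → pvCLe x r.2 p (j + 1 - p)) ?_
        have hx0 : x (r.2 + 0) = x (k + 0) := hceq 0 (by omega)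
        have hcmp : x r.2 ≤ x j := by
          rcases Nat.eq_zero_or_pos r.1 with h0 | h0
          · rw [h0] at hxme
            simp only [Nat.add_zero] at hx0 hxme
            exact le_of_eq (hx0.trans hxme.symm)
          · have hfc := pvInv_firstChar hInv (k + r.1) (by omega)
            simp only [Nat.add_zero] at hx0
            rw [hx0, hxme]
            exact hfc
        rcases lt_or_eq_of_le hcmp with hltc | heqc
        · exact Or.inl ⟨0, by omega, fun u hu => absurd hu (Nat.not_lt_zero u), by simpa using hltc⟩
        · refine Or.inr (fun t ht => ?_)
          have ht' : t = 0 := by omega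
          subst ht'
          simpa using heqc
      · exact HG3mid p hp (by omega)
  · have hme0 : r.1 = 0 := by
      rcases E5 with h0 | hxm
      · exact h0
      · exact absurd (hxm.trans E6.symm) hmx
    have hx0 : x (r.2 + 0) = x (k + 0) := hceq 0 (by omega)
    simp only [Nat.add_zero] at hx0
    by_cases hlx : x j < x (r.2 + r.1)
    · rw [hstep, if_neg hmx, if_pos hlx]
      have hxlt : x j < x k := by
        rw [hme0] at hlx
        simp only [Nat.add_zero] at hlx
        rw [← hx0]
        exact hlx
      refine ⟨by omega, ?_, ?_, ?_⟩
      · intro q hq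
        have hq0 : q = 0 := by omega
        subst hq0
        show pvUpd F 0 0 0 = pvMaxB x j 1
        simp [pvUpd, pvMaxB_one]
      · intro p hp
        have hfc := pvInv_firstChar hInv p hp
        exact ⟨0, by omega, fun u hu => absurd hu (Nat.not_lt_zero u),
          by simpa using lt_of_lt_of_le hxlt hfc⟩
      · intro p hp hpj
        omega
    · rw [hstep, if_neg hmx, if_neg hlx]
      have hgt : x r.2 < x j := by
        have h1 : x (r.2 + r.1) < x j :=
          lt_of_le_of_ne (le_of_not_gt hlx) (fun h => hmx h.symm)
        rw [hme0] at h1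
        simpa using h1
      refine ⟨by omega, ?_, HG2', ?_⟩
      · intro q hq
        by_cases hqc : q = j - r.2
        · subst hqc
          show pvUpd F (j - r.2) 0 (j - r.2) = pvMaxB x r.2 (j - r.2 + 1)
          have hupd : pvUpd F (j - r.2) 0 (j - r.2) = 0 := by simp [pvUpd]
          rw [hupd]
          rcases Nat.eq_zero_or_pos (pvMaxB x r.2 (j - r.2 + 1)) with h0 | hpos
          · exact h0.symm
          · exfalso
            have hMgood := pvMaxB_isB (x := x) (a := r.2) (L := j - r.2 + 1) (by omega)
            have hdec := pvDecomp hj' hkle hkej hceq (pvMaxB x r.2 (j - r.2 + 1)) hMgood hpos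
            rcases Nat.eq_zero_or_pos (pvMaxB x r.2 (j - r.2 + 1) - 1) with hb0 | hbpos
            · rw [hb0] at hdec
              simp only [Nat.add_zero] at hdec
              rw [hdec.2, ← hx0] at hgt
              exact lt_irrefl _ hgt
            · exact E3 (pvMaxB x r.2 (j - r.2 + 1) - 1) hdec.1 (by omega) hdec.2
        · show pvUpd F (j - r.2) 0 q = pvMaxB x r.2 (q + 1)
          have hupd : pvUpd F (j - r.2) 0 q = F q := by simp [pvUpd, hqc]
          rw [hupd]
          exact HG1low q (by omega)
      · intro p hp hpj1
        by_cases hpj : p = j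
        · refine (by rw [hpj]; exact id : pvCLe x r.2 j (j + 1 - j) → pvCLe x r.2 p (j + 1 - p)) ?_
          exact Or.inl ⟨0, by omega, fun u hu => absurd hu (Nat.not_lt_zero u), by simpa using hgt⟩
        · exact HG3mid p hp (by omega)

theorem pvRun_inv (x : Nat → Char) (d : Nat) : pvInv x (d + 1) (pvMRun x d).1 (pvMRun x d).2 := by
  induction d with
  | zero =>
    show pvInv x 1 0 (fun _ => 0)
    refine ⟨Nat.zero_lt_one, ?_, ?_, ?_⟩
    · intro q hq
      have : q = 0 := by omega
      subst this
      rfl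
    · intro p hp; omega
    · intro p hp hp'; omega
  | succ d ih => exact pvStep_inv x (d + 1) _ _ ih

-- ===== bridge: windows of x as lists, compared lexicographically =====
def pvSeg (x : Nat → Char) (a m : Nat) : List Char := (List.range m).map (fun t => x (a + t))

theorem pvSeg_succ (x : Nat → Char) (a m : Nat) : pvSeg x a (m + 1) = x a :: pvSeg x (a + 1) m := by
  unfold pvSeg
  rw [List.range_succ_eq_map, List.map_cons, List.map_map]
  refine congrArg₂ _ (by simp) ?_
  exact List.map_congr_left (fun t _ => congrArg x (by omega))

theorem pvCLt_succ_iff (x : Nat → Char) (a b m : Nat) :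
    pvCLt x a b (m + 1) ↔ x a < x b ∨ (x a = x b ∧ pvCLt x (a + 1) (b + 1) m) := by
  constructor
  · rintro ⟨t, ht, hpre, hlt⟩
    rcases t with _ | u
    · left; simpa using hlt
    · right
      refine ⟨by simpa using hpre 0 (Nat.succ_pos u), u, by omega, ?_, ?_⟩
      · intro v hv
        have h := hpre (v + 1) (by omega)
        have i1 : a + (v + 1) = a + 1 + v := by omega
        have i2 : b + (v + 1) = b + 1 + v := by omega
        rw [i1, i2] at h
        exact h
      · have i1 : a + (u + 1) = a + 1 + u := by omega
        have i2 : b + (u + 1) = b + 1 + u := by omega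
        rw [i1, i2] at hlt
        exact hlt
  · rintro (h | ⟨he, t, ht, hpre, hlt⟩)
    · exact ⟨0, by omega, fun u hu => absurd hu (Nat.not_lt_zero u), by simpa using h⟩
    · refine ⟨t + 1, by omega, ?_, ?_⟩
      · intro u hu
        rcases u with _ | v
        · simpa using he
        · have h := hpre v (by omega)
          have i1 : a + 1 + v = a + (v + 1) := by omega
          have i2 : b + 1 + v = b + (v + 1) := by omega
          rw [i1, i2] at h
          exact h
      · have i1 : a + 1 + t = a + (t + 1) := by omega
        have i2 : b + 1 + t = b + (t + 1) := by omega
        rw [i1, i2] at hlt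
        exact hlt

theorem pvSegLt (x : Nat → Char) : ∀ m a b, pvCLt x a b m → pvSeg x a m < pvSeg x b m := by
  intro m
  induction m with
  | zero =>
    intro a b h
    obtain ⟨t, ht, _⟩ := h
    omega
  | succ m ih =>
    intro a b h
    rw [pvSeg_succ, pvSeg_succ, List.cons_lt_cons_iff]
    rcases (pvCLt_succ_iff x a b m).mp h with h | ⟨he, h⟩
    · exact Or.inl h
    · exact Or.inr ⟨he, ih _ _ h⟩

theorem pvSegLe (x : Nat → Char) (m a b : Nat) (h : pvCLe x a b m) : pvSeg x a m ≤ pvSeg x b m := by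
  rcases h with h | h
  · exact le_of_lt (pvSegLt x m a b h)
  · exact le_of_eq (List.map_congr_left fun t ht => h t (List.mem_range.mp ht))

-- ===== endgame on the model: the final leader is < n and minimal among all rotations =====
theorem pvK_lt_n {x : Nat → Char} {n kN : Nat} {F : Nat → Nat} (hn : 0 < n)
    (hper : ∀ a, a + n < 2 * n → x (a + n) = x a)
    (hinv : pvInv x (2 * n) kN F) : kN < n := by
  obtain ⟨hkj, _, G2, _⟩ := hinv
  by_contra hge
  have hc := G2 (kN - n) (by omega)
  refine pvCLt_not_ceq hc (fun t ht => ?_)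
  have h := hper ((kN - n) + t) (by omega)
  have i1 : kN - n + t + n = kN + t := by omega
  rw [i1] at h
  exact h

theorem pvFinal {x : Nat → Char} {n kN : Nat} {F : Nat → Nat}
    (hinv : pvInv x (2 * n) kN F) (hk : kN < n) :
    ∀ p, p < n → pvCLe x kN p n := by
  obtain ⟨hkj, _, G2, G3⟩ := hinv
  intro p hp
  rcases lt_trichotomy p kN with hc | hc | hc
  · exact pvCLe_restrict (by omega) (Or.inl (G2 p hc))
  · rw [hc]
    exact Or.inr (pvCEq_refl x kN n)
  · exact pvCLe_restrict (by omega) (G3 p hc (by omega))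

-- ===== the doubled string, indexed as a total function =====
def pvX (sl : List Char) : Nat → Char := fun t => pvGetC (sl ++ sl) (t : Int)

theorem pvX_eq (sl : List Char) (t : Nat) : pvX sl t = ((sl ++ sl)[t]?).getD 'a' := by
  unfold pvX pvGetC
  rw [PySem.List.pyGet?_natCast]

theorem pvX_period (sl : List Char) (a : Nat) (h : a + sl.length < 2 * sl.length) :
    pvX sl (a + sl.length) = pvX sl a := by
  rw [pvX_eq, pvX_eq]
  have ha : a < sl.length := by omega
  rw [List.getElem?_append_right (show sl.length ≤ a + sl.length by omega),
      List.getElem?_append_left ha]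
  have hi : a + sl.length - sl.length = a := by omega
  rw [hi]

theorem pvRot_eq (sl : List Char) (p : Nat) (hp : p ≤ sl.length) :
    sl.drop p ++ sl.take p = pvSeg (pvX sl) p sl.length := by
  apply List.ext_getElem?
  intro i
  by_cases hi : i < sl.length
  · have hseg : (pvSeg (pvX sl) p sl.length)[i]? = some (pvX sl (p + i)) := by
      unfold pvSeg
      rw [List.getElem?_map, List.getElem?_range hi]
      rfl
    rw [hseg, pvX_eq]
    by_cases hc : i < sl.length - p
    · rw [List.getElem?_append_left (by simpa using by omega : i < (sl.drop p).length)]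
      rw [List.getElem?_drop]
      rw [List.getElem?_append_left (show p + i < sl.length by omega)]
      have hin : p + i < sl.length := by omega
      rw [List.getElem?_eq_getElem hin]
      rfl
    · rw [List.getElem?_append_right (by simpa using by omega : (sl.drop p).length ≤ i)]
      have hlen : (sl.drop p).length = sl.length - p := by simp
      rw [hlen]
      rw [List.getElem?_append_right (show sl.length ≤ p + i by omega)]
      have hidx : p + i - sl.length = i - (sl.length - p) := by omega
      rw [hidx]
      have hlt : i - (sl.length - p) < p := by omega
      rw [List.getElem?_take_of_lt hlt]
      have hin : i - (sl.length - p) < sl.length := by omega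
      rw [List.getElem?_eq_getElem hin]
      rfl
  · have h1 : (sl.drop p ++ sl.take p)[i]? = none := by
      rw [List.getElem?_eq_none_iff]
      simp
      omega
    have h2 : (pvSeg (pvX sl) p sl.length)[i]? = none := by
      rw [List.getElem?_eq_none_iff]
      unfold pvSeg
      simp
      omega
    rw [h1, h2]

-- ===== simulation: the Int/list port computes the Nat model =====
theorem pvSimWhile (sl : List Char) (fl : List Int) (F : Nat → Nat) (j B : Nat)
    (hrep : ∀ q, q < B → pvGetF fl (q : Int) = (F q : Int) - 1)
    (hFd : ∀ q, q < B → F q ≤ q)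
    (hB : B ≤ j) :
    ∀ fuel m kN, m < B → m + 1 ≤ fuel → kN ≤ j →
      boothWhile (sl ++ sl) fl (j : Int) fuel ((m : Int) - 1) (kN : Int)
        = (((pvMWhile (pvX sl) F j m kN).1 : Int) - 1, ((pvMWhile (pvX sl) F j m kN).2 : Int)) := by
  intro fuel
  induction fuel with
  | zero => intro m kN hm hf hk; omega
  | succ fuel ih =>
    intro m kN hm hf hk
    rcases m with _ | m
    · show boothWhile (sl ++ sl) fl (j : Int) (fuel + 1) ((0 : Nat) - 1 : Int) (kN : Int) = _
      rw [boothWhile]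
      rw [if_neg (by push_cast; simp)]
      rw [pvMWhile_zero]
    · have hi1 : ((m + 1 : Nat) : Int) - 1 = (m : Int) := by push_cast; ring
      have hidx : (kN : Int) + (((m + 1 : Nat) : Int) - 1) + 1 = ((kN + (m + 1) : Nat) : Int) := by
        push_cast; ring
      have hgj : pvGetC (sl ++ sl) (j : Int) = pvX sl j := rfl
      have hgk : pvGetC (sl ++ sl) ((kN + (m + 1) : Nat) : Int) = pvX sl (kN + (m + 1)) := rfl
      by_cases hc : pvX sl j = pvX sl (kN + (m + 1))
      · rw [boothWhile]
        rw [if_neg (by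
          rw [hidx, hgj, hgk]
          intro hand
          exact hand.2 hc)]
        rw [pvMWhile_succ_match _ _ _ _ _ hc]
      · have hFm : F m < m + 1 := Nat.lt_succ_of_le (hFd m (by omega))
        rw [boothWhile]
        rw [if_pos (by
          rw [hidx, hgj, hgk]
          exact ⟨by push_cast; omega, hc⟩)]
        rw [pvMWhile_succ_mis _ _ _ _ _ hc hFm]
        have hget : pvGetF fl (((m + 1 : Nat) : Int) - 1) = ((F m : Nat) : Int) - 1 := by
          rw [hi1]
          exact hrep m (by omega)
        rw [hget]
        have hkk : (if pvGetC (sl ++ sl) (j : Int) < pvGetC (sl ++ sl) ((kN : Int) + (((m + 1 : Nat) : Int) - 1) + 1) then (j : Int) - (((m + 1 : Nat) : Int) - 1) - 1 else (kN : Int))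
            = (((if pvX sl j < pvX sl (kN + (m + 1)) then j - (m + 1) else kN : Nat)) : Int) := by
          rw [hidx, hgj, hgk]
          by_cases hlt : pvX sl j < pvX sl (kN + (m + 1))
          · rw [if_pos hlt, if_pos hlt]
            push_cast [Nat.cast_sub (show m + 1 ≤ j by omega)]
            ring
          · rw [if_neg hlt, if_neg hlt]
        rw [hkk]
        exact ih (F m) _ (by omega) (by omega) (by split <;> omega)

theorem pvSetF_nat (fl : List Int) (d : Nat) (v : Int) (hd : d < fl.length) :
    pvSetF fl (d : Int) v = fl.set d v := by
  unfold pvSetF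
  rw [if_neg (by omega : ¬((d : Int) < 0)), if_pos ⟨by omega, by exact_mod_cast hd⟩]
  simp

theorem pvGetF_set_self (fl : List Int) (d : Nat) (v : Int) (hd : d < fl.length) :
    pvGetF (fl.set d v) (d : Int) = v := by
  unfold pvGetF
  rw [PySem.List.pyGet?_natCast, List.getElem?_set, if_pos rfl, if_pos hd]
  rfl

theorem pvGetF_set_ne (fl : List Int) (d q : Nat) (v : Int) (hne : d ≠ q) :
    pvGetF (fl.set d v) (q : Int) = pvGetF fl (q : Int) := by
  unfold pvGetF
  rw [PySem.List.pyGet?_natCast, List.getElem?_set, if_neg hne, ← PySem.List.pyGet?_natCast]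

theorem pvSimStep (sl : List Char) (fl : List Int) (F : Nat → Nat) (j kN : Nat)
    (hinv : pvInv (pvX sl) j kN F)
    (hlen : fl.length = 2 * sl.length) (hj2 : j < 2 * sl.length)
    (hrep : ∀ q, q < j - kN → pvGetF fl (q : Int) = (F q : Int) - 1) :
    (boothStep (sl ++ sl) ((kN : Int), fl) (j : Int)).1 = ((pvMStep (pvX sl) j (kN, F)).1 : Int) ∧
    (boothStep (sl ++ sl) ((kN : Int), fl) (j : Int)).2.length = 2 * sl.length ∧
    (∀ q, q < (j + 1) - (pvMStep (pvX sl) j (kN, F)).1 →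
      pvGetF (boothStep (sl ++ sl) ((kN : Int), fl) (j : Int)).2 (q : Int)
        = ((pvMStep (pvX sl) j (kN, F)).2 q : Int) - 1) := by
  have hInv := hinv
  obtain ⟨hkj, HF, G2, G3⟩ := hinv
  have hFd : ∀ q, q < j - kN → F q ≤ q := by
    intro q hq
    rw [HF q hq]
    exact Nat.lt_succ_iff.mp (pvMaxB_lt (Nat.succ_pos q))
  have hL : 0 < j - kN := by omega
  have hj' : j = kN + (j - kN) := by omega
  have hm0 : F (j - kN - 1) = pvMaxB (pvX sl) kN (j - kN) := by
    have h1 := HF (j - kN - 1) (by omega)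
    have hi : j - kN - 1 + 1 = j - kN := by omega
    rw [hi] at h1
    exact h1
  have hpost := pvLoop (pvX sl) kN (j - kN) j F hL hj' HF (F (j - kN - 1)) kN
      (by rw [hm0]; exact pvMaxB_isB hL)
      (Or.inl rfl)
      (by
        intro b hb hbg
        rw [hm0] at hbg
        exact absurd (pvLe_maxB hb) (by omega))
      (by
        intro b hb hbg _
        rw [hm0] at hbg
        exact absurd (pvLe_maxB hb) (by omega))
  set r := pvMWhile (pvX sl) F j (F (j - kN - 1)) kN with hr
  obtain ⟨E1, E2, E3, E4, E5, E6⟩ := hpost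
  have hmejk : r.1 < j - kN := E1.1
  have hkle : kN ≤ r.2 := by rcases E2 with h | ⟨h1, _⟩ <;> omega
  have hkej : r.2 < j := by rcases E2 with h | ⟨_, h2, _⟩ <;> omega
  -- the port's while-loop equals the model's
  have hm0B : F (j - kN - 1) < j - kN := by rw [hm0]; exact pvMaxB_lt hL
  have hw := pvSimWhile sl fl F j (j - kN) hrep hFd (by omega)
      (F (j - kN - 1) + 1) (F (j - kN - 1)) kN hm0B le_rfl (by omega)
  have e1 : ((j : Int) - (kN : Int) - 1) = ((j - kN - 1 : Nat) : Int) := by omega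
  have hi0 : pvGetF fl ((j : Int) - (kN : Int) - 1) = ((F (j - kN - 1) : Nat) : Int) - 1 := by
    rw [e1]
    exact hrep _ (by omega)
  have htoNat : (((F (j - kN - 1) : Nat) : Int) - 1 + 2).toNat = F (j - kN - 1) + 1 := by omega
  have hchar : pvGetC (sl ++ sl) ((r.2 : Int) + ((r.1 : Int) - 1) + 1) = pvX sl (r.2 + r.1) := by
    have hcast : (r.2 : Int) + ((r.1 : Int) - 1) + 1 = ((r.2 + r.1 : Nat) : Int) := by push_cast; ring
    rw [hcast]
    rfl
  have hgj : pvGetC (sl ++ sl) (j : Int) = pvX sl j := rfl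
  have hkey : boothStep (sl ++ sl) ((kN : Int), fl) (j : Int) =
      if pvX sl j = pvX sl (r.2 + r.1) then
        ((r.2 : Int), pvSetF fl ((j : Int) - (r.2 : Int)) (((r.1 : Int) - 1) + 1))
      else if pvX sl j < pvX sl (r.2 + r.1) then
        ((j : Int), pvSetF fl ((j : Int) - (j : Int)) (-1))
      else
        ((r.2 : Int), pvSetF fl ((j : Int) - (r.2 : Int)) (-1)) := by
    simp only [boothStep]
    rw [hi0, htoNat, hw, ← hr]
    simp only [hchar, hgj]
    by_cases hmx : pvX sl j = pvX sl (r.2 + r.1)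
    · rw [if_neg (by simpa using hmx), if_pos hmx]
    · rw [if_pos hmx, if_neg hmx]
      by_cases hlx : pvX sl j < pvX sl (r.2 + r.1)
      · rw [if_pos hlx, if_pos hlx]
      · rw [if_neg hlx, if_neg hlx]
  have hmodel : pvMStep (pvX sl) j (kN, F)
      = if pvX sl j = pvX sl (r.2 + r.1) then (r.2, pvUpd F (j - r.2) (r.1 + 1))
        else if pvX sl j < pvX sl (r.2 + r.1) then (j, pvUpd F 0 0)
        else (r.2, pvUpd F (j - r.2) 0) := rfl
  have hjr : ((j : Int) - (r.2 : Int)) = ((j - r.2 : Nat) : Int) := by omega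
  have hdlen : j - r.2 < fl.length := by omega
  have h0len : 0 < fl.length := by omega
  by_cases hmx : pvX sl j = pvX sl (r.2 + r.1)
  · rw [hkey, hmodel, if_pos hmx, if_pos hmx]
    refine ⟨rfl, ?_, ?_⟩
    · rw [hjr, pvSetF_nat fl _ _ hdlen]
      simp [hlen]
    · intro q hq
      rw [hjr, pvSetF_nat fl _ _ hdlen]
      by_cases hqd : q = j - r.2
      · subst hqd
        rw [pvGetF_set_self fl _ _ hdlen]
        simp [pvUpd]
      · rw [pvGetF_set_ne fl _ _ _ (fun h => hqd h.symm)]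
        have hql : q < j - kN := by omega
        rw [hrep q hql]
        simp only [pvUpd, if_neg hqd]
  · by_cases hlx : pvX sl j < pvX sl (r.2 + r.1)
    · rw [hkey, hmodel, if_neg hmx, if_neg hmx, if_pos hlx, if_pos hlx]
      refine ⟨rfl, ?_, ?_⟩
      · have hz : ((j : Int) - (j : Int)) = ((0 : Nat) : Int) := by omega
        rw [hz, pvSetF_nat fl _ _ h0len]
        simp [hlen]
      · intro q hq
        have hq0 : q = 0 := by omega
        subst hq0
        have hz : ((j : Int) - (j : Int)) = ((0 : Nat) : Int) := by omega
        rw [hz, pvSetF_nat fl _ _ h0len, pvGetF_set_self fl _ _ h0len]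
        simp [pvUpd]
    · rw [hkey, hmodel, if_neg hmx, if_neg hmx, if_neg hlx, if_neg hlx]
      refine ⟨rfl, ?_, ?_⟩
      · rw [hjr, pvSetF_nat fl _ _ hdlen]
        simp [hlen]
      · intro q hq
        rw [hjr, pvSetF_nat fl _ _ hdlen]
        by_cases hqd : q = j - r.2
        · subst hqd
          rw [pvGetF_set_self fl _ _ hdlen]
          simp [pvUpd]
        · rw [pvGetF_set_ne fl _ _ _ (fun h => hqd h.symm)]
          have hql : q < j - kN := by omega
          rw [hrep q hql]
          simp only [pvUpd, if_neg hqd]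

theorem pvSimRun (sl : List Char) :
    ∀ d, 1 ≤ d → d ≤ 2 * sl.length →
      ((PySem.List.pyRange 1 (d : Int) 1).foldl (boothStep (sl ++ sl))
          (0, List.replicate (2 * sl.length) (-1))).1 = ((pvMRun (pvX sl) (d - 1)).1 : Int) ∧
      ((PySem.List.pyRange 1 (d : Int) 1).foldl (boothStep (sl ++ sl))
          (0, List.replicate (2 * sl.length) (-1))).2.length = 2 * sl.length ∧
      (∀ q, q < d - (pvMRun (pvX sl) (d - 1)).1 →
        pvGetF ((PySem.List.pyRange 1 (d : Int) 1).foldl (boothStep (sl ++ sl))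
            (0, List.replicate (2 * sl.length) (-1))).2 (q : Int)
          = (((pvMRun (pvX sl) (d - 1)).2 q : Nat) : Int) - 1) := by
  intro d
  induction d with
  | zero => intro h; omega
  | succ d ih =>
    intro _ hd2
    rcases Nat.eq_zero_or_pos d with rfl | hd
    · refine ⟨rfl, by simp, ?_⟩
      intro q hq
      have hq0 : q = 0 := by omega
      subst hq0
      show pvGetF (List.replicate (2 * sl.length) (-1)) ((0 : Nat) : Int) = _
      unfold pvGetF
      rw [PySem.List.pyGet?_natCast]
      rw [List.getElem?_replicate]
      rw [if_pos (by omega)]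
      rfl
    · obtain ⟨h1, h2, h3⟩ := ih hd (by omega)
      have hrange : PySem.List.pyRange 1 ((d + 1 : Nat) : Int) 1
          = PySem.List.pyRange 1 (d : Int) 1 ++ [(d : Int)] := by
        have : ((d + 1 : Nat) : Int) = (d : Int) + 1 := by push_cast; ring
        rw [this]
        exact PySem.List.pyRange_one_succ_right (by omega)
      rw [hrange, List.foldl_append]
      set st := (PySem.List.pyRange 1 (d : Int) 1).foldl (boothStep (sl ++ sl))
          (0, List.replicate (2 * sl.length) (-1)) with hst
      simp only [List.foldl_cons, List.foldl_nil]
      have hinv := pvRun_inv (pvX sl) (d - 1)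
      have hd1 : d - 1 + 1 = d := by omega
      rw [hd1] at hinv
      have hsim := pvSimStep sl st.2 (pvMRun (pvX sl) (d - 1)).2 d (pvMRun (pvX sl) (d - 1)).1
          hinv h2 (by omega) h3
      have hstp : boothStep (sl ++ sl) st (d : Int)
          = boothStep (sl ++ sl) (((pvMRun (pvX sl) (d - 1)).1 : Int), st.2) (d : Int) := by
        rw [← h1]
      have hmr : pvMRun (pvX sl) (d + 1 - 1)
          = pvMStep (pvX sl) d ((pvMRun (pvX sl) (d - 1)).1, (pvMRun (pvX sl) (d - 1)).2) := by
        have : d + 1 - 1 = (d - 1) + 1 := by omega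
        rw [this]
        show pvMStep (pvX sl) (d - 1 + 1) (pvMRun (pvX sl) (d - 1)) = _
        rw [hd1]
      rw [hstp, hmr]
      exact ⟨hsim.1, hsim.2.1, hsim.2.2⟩

theorem pvCast2 (n : Nat) : (2 * (n : Int)) = ((2 * n : Nat) : Int) := by push_cast; ring

theorem pvA_val (s : String) (hn : 0 < s.toList.length) :
    pvMinimalRotation s
      = String.ofList (s.toList.drop (pvMRun (pvX s.toList) (2 * s.toList.length - 1)).1
          ++ s.toList.take (pvMRun (pvX s.toList) (2 * s.toList.length - 1)).1) := by
  obtain ⟨h1, _, _⟩ := pvSimRun s.toList (2 * s.toList.length) (by omega) le_rfl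
  show String.ofList
      (PySem.List.slice s.toList
        (some ((PySem.List.pyRange 1 (2 * (s.toList.length : Int)) 1).foldl
          (boothStep (s.toList ++ s.toList)) (0, List.replicate (2 * s.toList.length) (-1))).1) none
        ++ PySem.List.slice s.toList none
          (some ((PySem.List.pyRange 1 (2 * (s.toList.length : Int)) 1).foldl
            (boothStep (s.toList ++ s.toList)) (0, List.replicate (2 * s.toList.length) (-1))).1)) = _
  rw [pvCast2, h1, PySem.List.slice_from_natCast, PySem.List.slice_to_natCast]

theorem pvB_val (s : String) (hn : 0 < s.toList.length) (kf : Nat) (hk : kf < s.toList.length)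
    (hmin : ∀ p, p < s.toList.length → pvCLe (pvX s.toList) kf p s.toList.length) :
    pvBruteCanon s = String.ofList (pvSeg (pvX s.toList) kf s.toList.length) := by
  unfold pvBruteCanon
  rw [if_neg (by omega)]
  have hlist : (PySem.List.pyRange 0 (s.toList.length : Int) 1).map (fun i =>
        String.ofList (PySem.List.slice s.toList (some i) none
          ++ PySem.List.slice s.toList none (some i)))
      = (List.range s.toList.length).map (fun p => String.ofList (pvSeg (pvX s.toList) p s.toList.length)) := by
    rw [PySem.List.pyRange_zero_natCast, List.map_map]
    refine List.map_congr_left ?_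
    intro t ht
    have htn : t < s.toList.length := List.mem_range.mp ht
    show String.ofList (PySem.List.slice s.toList (some (t : Int)) none
        ++ PySem.List.slice s.toList none (some (t : Int))) = _
    rw [PySem.List.slice_from_natCast, PySem.List.slice_to_natCast,
        pvRot_eq s.toList t (le_of_lt htn)]
  rw [hlist]
  rcases hmm : PySem.List.min? ((List.range s.toList.length).map
      (fun p => String.ofList (pvSeg (pvX s.toList) p s.toList.length))) (fun x => x) with _ | m
  · exfalso
    have := (PySem.List.min?_eq_none_iff _ _).mp hmm
    have hr : List.range s.toList.length = [] := List.map_eq_nil_iff.mp this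
    rw [List.range_eq_nil] at hr
    omega
  · show m = _
    obtain ⟨p, hp, hpm⟩ := List.mem_map.mp (PySem.List.min?_mem hmm)
    have hpn : p < s.toList.length := List.mem_range.mp hp
    have hle1 : m ≤ String.ofList (pvSeg (pvX s.toList) kf s.toList.length) := by
      have := PySem.List.min?_isMin hmm (String.ofList (pvSeg (pvX s.toList) kf s.toList.length))
        (List.mem_map.mpr ⟨kf, List.mem_range.mpr hk, rfl⟩)
      exact this
    have hle2 : String.ofList (pvSeg (pvX s.toList) kf s.toList.length) ≤ m := by
      rw [← hpm]
      rw [String.le_iff_toList_le, String.toList_ofList, String.toList_ofList]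
      exact pvSegLe (pvX s.toList) s.toList.length kf p (hmin p hpn)
    exact le_antisymm hle1 hle2

-- the heart of the file: Booth's minimal rotation equals the brute-force minimum rotation
theorem pvCanon_eq (s : String) : pvMinimalRotation s = pvBruteCanon s := by
  rcases Nat.eq_zero_or_pos s.toList.length with h0 | hn
  · have hs : s = "" := String.toList_eq_nil_iff.mp (List.length_eq_zero_iff.mp h0)
    subst hs
    rfl
  · have hinv := pvRun_inv (pvX s.toList) (2 * s.toList.length - 1)
    have hd1 : 2 * s.toList.length - 1 + 1 = 2 * s.toList.length := by omega
    rw [hd1] at hinv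
    have hper : ∀ a, a + s.toList.length < 2 * s.toList.length →
        pvX s.toList (a + s.toList.length) = pvX s.toList a :=
      fun a ha => pvX_period s.toList a ha
    have hklt := pvK_lt_n hn hper hinv
    have hmin := pvFinal hinv hklt
    rw [pvA_val s hn, pvB_val s hn _ hklt hmin, pvRot_eq s.toList _ (le_of_lt hklt)]

theorem pvClasses_eq (strings : List String) :
    cyclic_shift_equivalence_classes strings = cyclic_shift_equivalence_classes_alt strings := by
  unfold cyclic_shift_equivalence_classes cyclic_shift_equivalence_classes_alt
  rw [PySem.Set.ofList_eq_foldl, List.foldl_map]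
  rw [show (fun (acc : PySem.Set String) s => PySem.Set.add acc (pvMinimalRotation s))
        = (fun (acc : PySem.Set String) s => PySem.Set.add acc (pvBruteCanon s)) from
      funext fun acc => funext fun s => by rw [pvCanon_eq]]
  rfl

-- ===== VERDICT (by name: the statement is the Claim_ definition above) =====
theorem cyclic_shift_equivalence_classes_spec : Claim_equal_cyclic_shift_equivalence_classes := by
  intro strings _
  exact pvClasses_eq strings
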